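-- pv_equiv track=rewrite | github.com/TarekElshami/PLN_Document_Anonymization | CoNLL2025 eval.py | process_tagged_text
-- ===== SOURCE A (Python) =====
-- ENTITY_LABELS = {
--     'CARDINAL': 'CARDINAL',
--     'DATE': 'DATE',
--     'EVENT': 'EVENT',
--     'FAC': 'FAC',
--     'GPE': 'GPE',
--     'LANGUAGE': 'LANGUAGE',
--     'LAW': 'LAW',
--     'LOC': 'LOC',
--     'MONEY': 'MONEY',
--     'NORP': 'NORP',
--     'ORDINAL': 'ORDINAL',
--     'ORG': 'ORG',
--     'PERCENT': 'PERCENT',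
--     'PERSON': 'PERSON',
--     'PRODUCT': 'PRODUCT',
--     'QUANTITY': 'QUANTITY',
--     'TIME': 'TIME',
--     'WORK_OF_ART': 'WORK_OF_ART',
-- }
--
-- def process_tagged_text(tagged_text, entities):
--     """Convierte el texto etiquetado y entidades en formato BIO."""
--     text = tagged_text
--     for entity_type in ENTITY_LABELS:
--         text = text.replace(f'<{entity_type}>', f'[{entity_type}_START]')
--         text = text.replace(f'</{entity_type}>', f'[{entity_type}_END]')
--
--     tokens = text.split()
--     bio_tags = []
--     i = 0
--
--     while i < len(tokens):
--         token = tokens[i]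
--         matched = False
--         for label in ENTITY_LABELS:
--             if token.startswith(f'[{label}_START]'):
--                 entity_name = []
--                 i += 1
--                 while i < len(tokens) and not tokens[i].endswith(f'[{label}_END]'):
--                     entity_name.append(tokens[i])
--                     i += 1
--                 if i < len(tokens) and tokens[i].endswith(f'[{label}_END]'):
--                     entity_name.append(tokens[i].replace(f'[{label}_END]', ''))
--                     i += 1
--                 if entity_name:
--                     bio_tags.append((entity_name[0], f'B-{label}'))
--                     for word in entity_name[1:]:
--                         bio_tags.append((word, f'I-{label}'))
--                 matched = True
--                 break
--         if not matched:
--             bio_tags.append((token, 'O'))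
--             i += 1
--
--     return bio_tags
-- ===== SOURCE B (Python) =====
-- ENTITY_LABELS = {
--     'CARDINAL': 'CARDINAL',
--     'DATE': 'DATE',
--     'EVENT': 'EVENT',
--     'FAC': 'FAC',
--     'GPE': 'GPE',
--     'LANGUAGE': 'LANGUAGE',
--     'LAW': 'LAW',
--     'LOC': 'LOC',
--     'MONEY': 'MONEY',
--     'NORP': 'NORP',
--     'ORDINAL': 'ORDINAL',
--     'ORG': 'ORG',
--     'PERCENT': 'PERCENT',
--     'PERSON': 'PERSON',
--     'PRODUCT': 'PRODUCT',
--     'QUANTITY': 'QUANTITY',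
--     'TIME': 'TIME',
--     'WORK_OF_ART': 'WORK_OF_ART',
-- }
--
--
-- def process_tagged_text(tagged_text, entities):
--     """Single-pass state machine: one flat loop over the tokens instead of an
--     index loop with a nested collecting while-loop."""
--     text = tagged_text
--     for entity_type in ENTITY_LABELS:
--         text = text.replace(f'<{entity_type}>', f'[{entity_type}_START]')
--         text = text.replace(f'</{entity_type}>', f'[{entity_type}_END]')
--
--     bio_tags = []
--     current_label = None
--     entity_name = []
--
--     for token in text.split():
--         if current_label is None:
--             found = next((l for l in ENTITY_LABELS
--                           if token.startswith(f'[{l}_START]')), None)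
--             if found is not None:
--                 current_label = found
--                 entity_name = []
--             else:
--                 bio_tags.append((token, 'O'))
--         else:
--             end_mark = f'[{current_label}_END]'
--             if token.endswith(end_mark):
--                 entity_name.append(token.replace(end_mark, ''))
--                 bio_tags.append((entity_name[0], f'B-{current_label}'))
--                 bio_tags.extend((w, f'I-{current_label}') for w in entity_name[1:])
--                 current_label = None
--             else:
--                 entity_name.append(token)
--
--     if current_label is not None and entity_name:
--         bio_tags.append((entity_name[0], f'B-{current_label}'))
--         bio_tags.extend((w, f'I-{current_label}') for w in entity_name[1:])
--
--     return bio_tags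
-- ===== Notes on version B (the rewrite author's own statement) =====
-- stated objective: alternative
-- what changed: A's index-based outer while with a nested inner while that collects each entity is replaced by one flat pass over the tokens driven by a (current_label, buffer) state machine that flushes a buffered entity when its END marker (or the end of input) is reached.
import Mathlib
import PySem

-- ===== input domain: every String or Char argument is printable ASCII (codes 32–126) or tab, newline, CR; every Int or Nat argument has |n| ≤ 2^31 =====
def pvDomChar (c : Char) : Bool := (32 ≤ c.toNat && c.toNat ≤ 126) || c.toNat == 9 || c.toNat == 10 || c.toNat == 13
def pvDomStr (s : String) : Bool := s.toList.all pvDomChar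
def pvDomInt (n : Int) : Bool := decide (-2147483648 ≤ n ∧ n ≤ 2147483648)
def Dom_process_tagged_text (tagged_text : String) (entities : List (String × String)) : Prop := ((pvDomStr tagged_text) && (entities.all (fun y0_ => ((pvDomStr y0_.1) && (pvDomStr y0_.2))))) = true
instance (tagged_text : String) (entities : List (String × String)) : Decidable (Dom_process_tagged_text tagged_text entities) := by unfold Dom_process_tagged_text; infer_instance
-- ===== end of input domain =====

-- B replaces A's index loop with a nested collecting while-loop by ONE flat pass
-- over the tokens that carries a (current label, buffer) state (alternative
-- decomposition, same cost); return values proved equal on all inputs.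

-- Shared constants / preprocessing (identical first phase in Source A and Source B)
def pvLabels : List String :=
  ["CARDINAL", "DATE", "EVENT", "FAC", "GPE", "LANGUAGE", "LAW", "LOC",
   "MONEY", "NORP", "ORDINAL", "ORG", "PERCENT", "PERSON", "PRODUCT",
   "QUANTITY", "TIME", "WORK_OF_ART"]

def pvStartMark (l : String) : String := "[" ++ l ++ "_START]"
def pvEndMark (l : String) : String := "[" ++ l ++ "_END]"

-- text.replace(f'<{t}>', …).replace(f'</{t}>', …) for every label, in order
def pvPreprocess (s : String) : String :=
  pvLabels.foldl
    (fun t l =>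
      PySem.Str.replace (PySem.Str.replace t ("<" ++ l ++ ">") (pvStartMark l))
        ("</" ++ l ++ ">") (pvEndMark l)) s

-- first label whose START marker prefixes the token (the for/break in A, the
-- `next(… generator …)` in B)
def pvFindLabel (token : String) : Option String :=
  pvLabels.find? (fun l => PySem.Str.startswith token (pvStartMark l))

-- emit (w0, B-label) then (wi, I-label); empty entity_name emits nothing
def pvFlush (lab : String) : List String → List (String × String)
  | [] => []
  | x :: xs => (x, "B-" ++ lab) :: xs.map (fun w => (w, "I-" ++ lab))

-- ===== PORT A =====
-- inner while of A: collect tokens until one ends with the END marker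
-- (that one is appended with the marker removed); returns (entity_name, rest)
def pvCollect (lab : String) : List String → List String × List String
  | [] => ([], [])
  | t :: ts =>
    if PySem.Str.endswith t (pvEndMark lab) then
      ([PySem.Str.replace t (pvEndMark lab) ""], ts)
    else
      let p := pvCollect lab ts
      (t :: p.1, p.2)

theorem pvCollect_rest_le (lab : String) : ∀ ts : List String,
    (pvCollect lab ts).2.length ≤ ts.length
  | [] => Nat.le_refl _
  | t :: ts => by
    simp only [pvCollect]
    split
    · simp
    · exact Nat.le_succ_of_le (pvCollect_rest_le lab ts)

-- A's outer while over the token index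
def pvLoopA : List String → List (String × String)
  | [] => []
  | t :: ts =>
    match pvFindLabel t with
    | some lab =>
      let p := pvCollect lab ts
      pvFlush lab p.1 ++ pvLoopA p.2
    | none => (t, "O") :: pvLoopA ts
termination_by ts => ts.length
decreasing_by
  · exact Nat.lt_succ_of_le (pvCollect_rest_le lab ts)
  · simp

def process_tagged_text (tagged_text : String) (entities : List (String × String)) : List (String × String) :=
  pvLoopA (PySem.Str.split₀ (pvPreprocess tagged_text))

-- ===== PORT B =====
-- B's single flat loop: state = (current_label : Option String, entity_name buffer);
-- after the loop, flush a still-open non-empty buffer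
def pvGoB : Option String → List String → List String → List (String × String)
  | none, _, [] => []
  | some lab, buf, [] => if buf.isEmpty then [] else pvFlush lab buf
  | none, buf, t :: ts =>
    match pvFindLabel t with
    | some lab => pvGoB (some lab) [] ts
    | none => (t, "O") :: pvGoB none buf ts
  | some lab, buf, t :: ts =>
    if PySem.Str.endswith t (pvEndMark lab) then
      pvFlush lab (buf ++ [PySem.Str.replace t (pvEndMark lab) ""]) ++ pvGoB none [] ts
    else
      pvGoB (some lab) (buf ++ [t]) ts

def process_tagged_text_alt (tagged_text : String) (entities : List (String × String)) : List (String × String) :=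
  pvGoB none [] (PySem.Str.split₀ (pvPreprocess tagged_text))

-- ===== PRECONDITION & SPEC =====
def Spec_process_tagged_text (tagged_text : String) (entities : List (String × String)) (out : List (String × String)) : Prop := out = process_tagged_text_alt tagged_text entities
instance (tagged_text : String) (entities : List (String × String)) (out : List (String × String)) : Decidable (Spec_process_tagged_text tagged_text entities out) := by unfold Spec_process_tagged_text; infer_instance

-- ===== CLAIM (what is proved, stated in full; the proofs are below) =====
def Claim_equal_process_tagged_text : Prop := ∀ (tagged_text : String) (entities : List (String × String)), Dom_process_tagged_text tagged_text entities → Spec_process_tagged_text tagged_text entities (process_tagged_text tagged_text entities)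

-- ===== LEMMAS AND PROOFS =====

-- Joint invariant, by strong induction on the token-list length:
-- (1) in the idle state B's pass computes A's outer loop;
-- (2) in the collecting state B's pass computes flush(buf ++ collected) followed
--     by A's outer loop on the remaining tokens.
theorem pvKey : ∀ (n : Nat) (ts : List String), ts.length ≤ n →
    (∀ buf, pvLoopA ts = pvGoB none buf ts) ∧
    (∀ lab buf, pvGoB (some lab) buf ts =
        pvFlush lab (buf ++ (pvCollect lab ts).1) ++ pvLoopA (pvCollect lab ts).2) := by
  intro n
  induction n with
  | zero =>
    intro ts hts
    have h : ts = [] := List.eq_nil_of_length_eq_zero (Nat.le_zero.mp hts)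
    subst h
    refine ⟨fun _ => by simp [pvLoopA, pvGoB], fun lab buf => ?_⟩
    cases buf <;> simp [pvGoB, pvCollect, pvLoopA, pvFlush]
  | succ n ih =>
    intro ts hts
    cases ts with
    | nil =>
      refine ⟨fun _ => by simp [pvLoopA, pvGoB], fun lab buf => ?_⟩
      cases buf <;> simp [pvGoB, pvCollect, pvLoopA, pvFlush]
    | cons t ts' =>
      have hts' : ts'.length ≤ n := Nat.le_of_succ_le_succ hts
      constructor
      · intro buf
        rw [pvLoopA, pvGoB]
        cases h : pvFindLabel t with
        | some lab =>
          simp only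
          rw [(ih ts' hts').2 lab []]
          simp
        | none =>
          simp only
          rw [(ih ts' hts').1 buf]
      · intro lab buf
        rw [pvGoB, pvCollect]
        by_cases hE : PySem.Str.endswith t (pvEndMark lab) = true
        · simp only [hE, if_pos]
          rw [← (ih ts' hts').1 []]
        · simp only [hE, if_neg, Bool.false_eq_true, not_false_eq_true]
          rw [(ih ts' hts').2 lab (buf ++ [t])]
          simp

-- ===== VERDICT (by name: the statement is the Claim_ definition above) =====
theorem process_tagged_text_spec : Claim_equal_process_tagged_text := by
  intro tagged_text entities _
  unfold Spec_process_tagged_text process_tagged_text process_tagged_text_alt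
  exact (pvKey _ _ (Nat.le_refl _)).1 []
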